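-- pv_equiv track=rewrite | github.com/ekeilty17/Advent-of-Code | 2015/Day_20/part_2.py | solution
-- ===== SOURCE A (Python) =====
-- def solution(num_presents: int) -> int:
--     N = num_presents
--     presents = [0] * (N+1)
--
--     for f in range(1, N+1):
--         for k in range(1, 51):
--             if k*f > N:
--                 break
--             presents[k*f] += 11 * f
--
--         if presents[f] >= N:
--             return f
-- ===== SOURCE B (Python) =====
-- def solution(num_presents: int) -> int:
--     N = num_presents
--     for h in range(1, N+1):
--         total = 0
--         for k in range(1, 51):
--             if h % k == 0:
--                 total += 11 * (h // k)
--         if total >= N: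
--             return h
-- ===== Notes on version B (the rewrite author's own statement) =====
-- stated objective: faster
-- what changed: Replaces A's forward sieve (allocating an O(N) presents array and having each elf f scatter 11*f into houses k*f) by a stateless per-house gather that sums 11*(h//k) over the at most 50 divisors k <= 50 of each house h, returning the first qualifying house.
-- outside the precondition, e.g. on solution(0): A returns None, B returns None; on solution(-5): A returns None, B returns None
import Mathlib
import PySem

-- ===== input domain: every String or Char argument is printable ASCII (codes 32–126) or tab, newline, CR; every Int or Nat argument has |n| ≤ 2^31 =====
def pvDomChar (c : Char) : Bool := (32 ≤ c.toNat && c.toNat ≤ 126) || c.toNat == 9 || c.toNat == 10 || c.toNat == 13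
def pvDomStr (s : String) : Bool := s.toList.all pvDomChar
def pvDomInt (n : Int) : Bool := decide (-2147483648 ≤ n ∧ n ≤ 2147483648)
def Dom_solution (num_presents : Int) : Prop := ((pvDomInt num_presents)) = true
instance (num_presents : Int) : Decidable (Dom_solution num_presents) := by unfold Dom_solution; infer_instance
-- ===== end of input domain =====

-- B replaces A's forward sieve (an O(N)-sized presents array filled elf by elf) by a per-house
-- gather: each house h sums 11*(h//k) over the at most 50 elves k ≤ 50 that divide h; no array.
-- Objective: faster (constant factor, measured) — no O(N) list allocation or list writes.

-- ===== PORT A =====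
-- inner 'for k in range(1, 51)' with its break; the write index k*f lies in [1, N] here
-- (k*f ≤ N is checked before the write), so List.set/getD at (k*f).toNat is exact.
def aInner (N f : Int) : Nat → Int → List Int → List Int
  | 0, _, presents => presents
  | fuel+1, k, presents =>
      if k * f > N then presents
      else aInner N f fuel (k+1)
        (presents.set (k*f).toNat (presents.getD (k*f).toNat 0 + 11 * f))

-- outer 'for f in range(1, N+1)' with the early return; [] = loop exhausted
-- (Python returns None there — excluded by Pre_solution; the port returns 0)
def aOuter (N : Int) : List Int → List Int → Int
  | [], _ => 0
  | f :: fs, presents =>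
      let presents' := aInner N f 50 1 presents
      if presents'.getD f.toNat 0 ≥ N then f else aOuter N fs presents'

def solution (num_presents : Int) : Int :=
  aOuter num_presents (PySem.List.pyRange 1 (num_presents+1) 1)
    (List.replicate (num_presents+1).toNat 0)

-- ===== PORT B =====
-- total presents at house h: 11*(h//k) for every k in range(1, 51) dividing h
def bTotal (h : Int) : Int :=
  (PySem.List.pyRange 1 51 1).foldl
    (fun total k => if PySem.Int.mod h k = 0 then total + 11 * PySem.Int.floordiv h k else total) 0

-- 'for h in range(1, N+1): … return h'; [] = loop exhausted (None in Python, outside Pre_)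
def bFind (N : Int) : List Int → Int
  | [] => 0
  | h :: hs => if bTotal h ≥ N then h else bFind N hs

def solution_alt (num_presents : Int) : Int :=
  bFind num_presents (PySem.List.pyRange 1 (num_presents+1) 1)

-- ===== PRECONDITION & SPEC =====
-- Pre_ excludes num_presents ≤ 0, where A's loop body never runs and A returns None (not an int).
def Pre_solution (num_presents : Int) : Prop := 1 ≤ num_presents
instance (num_presents : Int) : Decidable (Pre_solution num_presents) := by unfold Pre_solution; infer_instance
def pvWitness_solution : Int := (30)

def Spec_solution (num_presents : Int) (out : Int) : Prop := out = solution_alt num_presents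
instance (num_presents : Int) (out : Int) : Decidable (Spec_solution num_presents out) := by unfold Spec_solution; infer_instance

-- ===== CLAIM (what is proved, stated in full; the proofs are below) =====
def Claim_equal_solution : Prop := ∀ (num_presents : Int), Dom_solution num_presents → Pre_solution num_presents → Spec_solution num_presents (solution num_presents)

-- ===== LEMMAS AND PROOFS =====

-- proof-side reference sum: presents delivered to house h by the elves 1..m
-- (indexed by the multiplicity k = 1+i ∈ [1,50]: elf h/k delivered iff k ∣ h and h/k ≤ m)
def Tm (m h : Int) : Int :=
  ∑ i ∈ Finset.range 50, (if (1 + (i:Int)) ∣ h ∧ h / (1 + (i:Int)) ≤ m then 11 * (h / (1 + (i:Int))) else 0)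

lemma foldl_ite_add_eq_sum (g : Int → Int) (c : Int → Prop) [DecidablePred c] :
    ∀ (n : Nat) (a init : Int),
      (PySem.List.pyRange a (a + n) 1).foldl (fun acc k => if c k then acc + g k else acc) init
        = init + ∑ i ∈ Finset.range n, (if c (a + (i:Int)) then g (a + (i:Int)) else 0) := by
  intro n
  induction n with
  | zero => intro a init; simp [PySem.List.pyRange_one_eq_nil]
  | succ n ih =>
    intro a init
    have h1 : a + (n+1 : Nat) = (a + n) + 1 := by push_cast; ring
    rw [h1, PySem.List.pyRange_one_succ_right (by omega), List.foldl_append, ih,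
      Finset.sum_range_succ]
    simp only [List.foldl_cons, List.foldl_nil]
    split_ifs with hc <;> ring

lemma Tm_house_zero (m : Int) : Tm m 0 = 0 := by
  unfold Tm
  refine Finset.sum_eq_zero fun i _ => ?_
  split_ifs <;> simp

lemma Tm_zero (h : Int) (hh : 0 ≤ h) : Tm 0 h = 0 := by
  rcases eq_or_lt_of_le hh with he | hp
  · rw [← he]; exact Tm_house_zero 0
  · unfold Tm
    refine Finset.sum_eq_zero fun i _ => ?_
    rw [if_neg]
    rintro ⟨hd, hle⟩
    have h1 : 1 + (i:Int) ≤ h := Int.le_of_dvd hp hd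
    have h2 : 1 * (1 + (i:Int)) ≤ h := by omega
    have := (Int.le_ediv_iff_mul_le (by positivity)).mpr h2
    omega

lemma Tm_step (m h : Int) (hh : 1 ≤ h) (hm : 0 ≤ m) :
    Tm (m+1) h = Tm m h + (if (m+1) ∣ h ∧ h / (m+1) ≤ 50 then 11 * (m+1) else 0) := by
  unfold Tm
  have term : ∀ i ∈ Finset.range 50,
      (if (1 + (i:Int)) ∣ h ∧ h / (1 + (i:Int)) ≤ m + 1 then 11 * (h / (1 + (i:Int))) else 0)
      = (if (1 + (i:Int)) ∣ h ∧ h / (1 + (i:Int)) ≤ m then 11 * (h / (1 + (i:Int))) else 0)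
        + (if (1 + (i:Int)) ∣ h ∧ h / (1 + (i:Int)) = m + 1 then 11 * (h / (1 + (i:Int))) else 0) := by
    intro i _
    by_cases hd : (1 + (i:Int)) ∣ h
    · by_cases he : h / (1 + (i:Int)) = m + 1
      · rw [if_pos ⟨hd, by omega⟩, if_neg (by rintro ⟨-, h2⟩; omega), if_pos ⟨hd, he⟩]; ring
      · by_cases hle : h / (1 + (i:Int)) ≤ m
        · rw [if_pos ⟨hd, by omega⟩, if_pos ⟨hd, hle⟩, if_neg (by rintro ⟨-, h2⟩; omega)]; ring
        · rw [if_neg (by rintro ⟨-, h2⟩; omega), if_neg (by rintro ⟨-, h2⟩; omega),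
            if_neg (by rintro ⟨-, h2⟩; omega)]; ring
    · rw [if_neg (by rintro ⟨h1, -⟩; exact hd h1), if_neg (by rintro ⟨h1, -⟩; exact hd h1),
        if_neg (by rintro ⟨h1, -⟩; exact hd h1)]; ring
  rw [Finset.sum_congr rfl term, Finset.sum_add_distrib]
  congr 1
  by_cases hc : (m+1) ∣ h ∧ h / (m+1) ≤ 50
  · obtain ⟨hd, h50⟩ := hc
    have hm1 : (0:Int) < m + 1 := by omega
    have hq1 : 1 ≤ h / (m+1) := (Int.le_ediv_iff_mul_le hm1).mpr (by
      have := Int.le_of_dvd (by omega) hd; omega)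
    set q := h / (m+1) with hqdef
    have hqe : q * (m+1) = h := Int.ediv_mul_cancel hd
    have hi0 : (q - 1).toNat ∈ Finset.range 50 := by
      simp only [Finset.mem_range]; omega
    rw [if_pos ⟨hd, h50⟩, Finset.sum_eq_single_of_mem (q-1).toNat hi0]
    · have hcast : 1 + (((q-1).toNat : Nat) : Int) = q := by omega
      rw [hcast]
      have hqd : q ∣ h := Dvd.intro (m+1) (by linarith [hqe])
      have hhq : h / q = m + 1 := by
        rw [← hqe, Int.mul_ediv_cancel_left _ (by omega)]
      rw [if_pos ⟨hqd, hhq⟩, hhq]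
    · intro b hb hne
      rw [if_neg]
      rintro ⟨hbd, hbe⟩
      have hbe' : (1 + (b:Int)) * (m+1) = h := by
        rw [← hbe, mul_comm]; exact Int.ediv_mul_cancel hbd
      have : (1 + (b:Int)) = q := by
        have := hqe
        have hpos : (0:Int) < m + 1 := hm1
        nlinarith
      omega
  · rw [if_neg hc, Finset.sum_eq_zero]
    intro i _
    rw [if_neg]
    rintro ⟨hd, he⟩
    have : (1 + (i:Int)) * (m+1) = h := by rw [← he, mul_comm]; exact Int.ediv_mul_cancel hd
    have hmd : (m+1) ∣ h := Dvd.intro_left _ this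
    have : h / (m+1) = 1 + (i:Int) := by
      rw [← this, Int.mul_ediv_cancel _ (by omega)]
    simp only [Finset.mem_range] at *
    exact hc ⟨hmd, by omega⟩

lemma bTotal_eq_Tm (m : Int) (hm : 1 ≤ m) : bTotal m = Tm m m := by
  unfold bTotal Tm
  have h51 : (51:Int) = 1 + (50:Nat) := by norm_num
  rw [h51, foldl_ite_add_eq_sum (fun k => 11 * PySem.Int.floordiv m k)
    (fun k => PySem.Int.mod m k = 0) 50 1 0, zero_add]
  refine Finset.sum_congr rfl fun i _ => ?_
  have hpos : (0:Int) < 1 + (i:Int) := by positivity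
  rw [PySem.Int.floordiv_eq_ediv_of_pos hpos]
  by_cases hd : (1 + (i:Int)) ∣ m
  · rw [if_pos ((PySem.Int.mod_eq_zero_iff_dvd m _).mpr hd),
      if_pos ⟨hd, Int.ediv_le_self _ (by omega)⟩]
  · rw [if_neg (fun hc => hd ((PySem.Int.mod_eq_zero_iff_dvd m _).mp hc)),
      if_neg (by rintro ⟨h1, -⟩; exact hd h1)]

lemma aInner_length (N f : Int) :
    ∀ (fuel : Nat) (k : Int) (ps : List Int), (aInner N f fuel k ps).length = ps.length := by
  intro fuel
  induction fuel with
  | zero => intro k ps; rfl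
  | succ n ih =>
    intro k ps
    unfold aInner
    split
    · rfl
    · rw [ih, List.length_set]

lemma aInner_getD (N f : Int) (hf : 1 ≤ f) :
    ∀ (fuel : Nat) (k : Int) (ps : List Int), 1 ≤ k → ps.length = (N+1).toNat →
      ∀ h : Nat, h < ps.length →
        (aInner N f fuel k ps).getD h 0 =
          ps.getD h 0 + (if f ∣ (h:Int) ∧ k ≤ (h:Int)/f ∧ (h:Int)/f < k + fuel then 11 * f else 0) := by
  intro fuel
  induction fuel with
  | zero =>
    intro k ps hk hlen h hh
    rw [aInner, if_neg (by rintro ⟨-, h1, h2⟩; omega)]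
    ring
  | succ n ih =>
    intro k ps hk hlen h hh
    have hhN : (h:Int) ≤ N := by omega
    unfold aInner
    split
    · rename_i hbr
      rw [if_neg]
      · ring
      rintro ⟨hd, hkq, -⟩
      have h1 : (h:Int)/f * f ≤ (h:Int) := Int.ediv_mul_le _ (by omega)
      have h2 : k * f ≤ (h:Int)/f * f := by
        exact mul_le_mul_of_nonneg_right hkq (by omega)
      omega
    · rename_i hbr
      have hbr' : k * f ≤ N := by omega
      have hkf1 : 1 ≤ k * f := by nlinarith
      have hidx : (k*f).toNat < ps.length := by omega
      rw [ih (k+1) _ (by omega) (by rw [List.length_set]; exact hlen) h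
        (by rw [List.length_set]; exact hh)]
      have hset : ∀ m : Nat, m < ps.length →
          (ps.set (k*f).toNat (ps.getD (k*f).toNat 0 + 11 * f)).getD m 0
          = if m = (k*f).toNat then ps.getD m 0 + 11 * f else ps.getD m 0 := by
        intro m hm
        by_cases he : m = (k*f).toNat
        · subst he
          rw [if_pos rfl, List.getD_eq_getElem _ _ (by rwa [List.length_set]),
            List.getElem_set_self, List.getD_eq_getElem _ _ hm]
        · rw [if_neg he, List.getD_eq_getElem _ _ (by rwa [List.length_set]),
            List.getElem_set_ne (by omega), List.getD_eq_getElem _ _ hm]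
      rw [hset h hh]
      by_cases hdvd : f ∣ (h:Int)
      · have hq : (h:Int)/f * f = (h:Int) := Int.ediv_mul_cancel hdvd
        by_cases he : h = (k*f).toNat
        · have hhe : (h:Int) = k * f := by omega
          have hqk : (h:Int)/f = k := by
            rw [hhe, Int.mul_ediv_cancel _ (by omega)]
          rw [if_pos he, if_neg (by rintro ⟨-, h1, -⟩; omega),
            if_pos ⟨hdvd, by omega, by omega⟩]
          ring
        · have hqk : (h:Int)/f ≠ k := by
            intro hc
            apply he
            have : (h:Int) = k * f := by rw [← hq, hc]
            omega
          rw [if_neg he]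
          have hiff : (f ∣ (h:Int) ∧ k + 1 ≤ (h:Int)/f ∧ (h:Int)/f < k + 1 + (n:Int))
              ↔ (f ∣ (h:Int) ∧ k ≤ (h:Int)/f ∧ (h:Int)/f < k + ((n+1 : Nat) : Int)) := by
            constructor
            · rintro ⟨hA, hB, hC⟩; exact ⟨hA, by omega, by push_cast; omega⟩
            · rintro ⟨hA, hB, hC⟩; push_cast at hC; exact ⟨hA, by omega, by omega⟩
          rw [if_congr hiff rfl rfl]
      · have hne : h ≠ (k*f).toNat := by
          intro he
          apply hdvd
          have hhe : (h:Int) = k * f := by rw [he]; omega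
          exact hhe ▸ dvd_mul_left f k
        rw [if_neg hne, if_neg (fun hx => hdvd hx.1), if_neg (fun hx => hdvd hx.1)]

lemma loop_eq (N : Int) (hN : 1 ≤ N) :
    ∀ (len : Nat) (m : Int) (ps : List Int), 1 ≤ m → len = (N+1-m).toNat →
      ps.length = (N+1).toNat →
      (∀ h : Nat, h < ps.length → ps.getD h 0 = Tm (m-1) (h:Int)) →
      aOuter N (PySem.List.pyRange m (N+1) 1) ps = bFind N (PySem.List.pyRange m (N+1) 1) := by
  intro len
  induction len with
  | zero =>
    intro m ps hm hlen hpslen hinv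
    rw [PySem.List.pyRange_one_eq_nil (by omega)]
    rfl
  | succ n ih =>
    intro m ps hm hlen hpslen hinv
    have hmN : m < N + 1 := by omega
    rw [PySem.List.pyRange_one_cons hmN]
    simp only [aOuter, bFind]
    have hinv' : ∀ h : Nat, h < ps.length →
        (aInner N m 50 1 ps).getD h 0 = Tm m (h:Int) := by
      intro h hh
      rw [aInner_getD N m hm 50 1 ps le_rfl hpslen h hh, hinv h hh]
      by_cases h0 : h = 0
      · subst h0
        rw [if_neg (by
          rintro ⟨-, hx, -⟩
          rw [Nat.cast_zero, Int.zero_ediv] at hx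
          omega)]
        simp only [Nat.cast_zero, Tm_house_zero, add_zero]
      · have hpos : (1:Int) ≤ (h:Int) := by omega
        have hstep := Tm_step (m-1) (h:Int) hpos (by omega)
        rw [sub_add_cancel] at hstep
        rw [hstep]
        congr 1
        have hiff : (m ∣ (h:Int) ∧ 1 ≤ (h:Int)/m ∧ (h:Int)/m < 1 + (50:Nat))
            ↔ (m ∣ (h:Int) ∧ (h:Int)/m ≤ 50) := by
          constructor
          · rintro ⟨hd, h1, h2⟩; push_cast at h2; exact ⟨hd, by omega⟩
          · rintro ⟨hd, h2⟩
            have hle : m ≤ (h:Int) := Int.le_of_dvd (by omega) hd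
            have h1 : 1 ≤ (h:Int)/m := (Int.le_ediv_iff_mul_le (by omega)).mpr (by omega)
            exact ⟨hd, h1, by push_cast; omega⟩
        rw [if_congr hiff rfl rfl]
    have hmlt : m.toNat < ps.length := by omega
    have hval : (aInner N m 50 1 ps).getD m.toNat 0 = Tm m m := by
      rw [hinv' m.toNat hmlt]
      congr 1
      omega
    rw [hval, bTotal_eq_Tm m hm]
    by_cases hge : Tm m m ≥ N
    · rw [if_pos hge, if_pos hge]
    · rw [if_neg hge, if_neg hge]
      refine ih (m+1) (aInner N m 50 1 ps) (by omega) (by omega)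
        (by rw [aInner_length]; exact hpslen) ?_
      intro h hh
      rw [aInner_length] at hh
      have := hinv' h hh
      rw [add_sub_cancel_right]
      exact this

-- ===== VERDICT (by name: the statement is the Claim_ definition above) =====
theorem solution_spec : Claim_equal_solution := by
  intro N _ hpre
  unfold Spec_solution solution solution_alt
  refine loop_eq N hpre (N+1-1).toNat 1 _ le_rfl rfl (List.length_replicate ..) ?_
  intro h hlt
  simp only [List.length_replicate] at hlt
  simp only [List.getD, List.length_replicate, hlt, getElem?_pos, List.getElem_replicate,
    Option.getD_some]
  exact (Tm_zero (h:Int) (by positivity)).symm
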